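-- pv_equiv track=rewrite | github.com/PierfrancescoConti/PenTasker | pentasker.py | clean_out_dirsearch
-- ===== SOURCE A (Python) =====
-- def clean_out_dirsearch(output):
--     out=output.split('\n')
--     ret=''
--     x=False
--     fpath=''
--     for line in out:
--         if 'Output' in line:
--             fpath=line.split(":")[1].strip()
--         elif 'Extensions:' in line:
--             x=True
--             ret+=line + '\n'
--         elif 'Error Log:' in line or 'Output File:' in line or '] 400 - ' in line or '] 401 - ' in line or '] 402 - ' in line or '] 403 - ' in line or '] 404 - ' in line or x==False:
--             continue
--         else:
--             ret+=line + '\n'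
--     return ret, fpath
-- ===== SOURCE B (Python) =====
-- def clean_out_dirsearch(output):
--     lines = output.split('\n')
--
--     # pass 1: the last 'Output' line wins the fpath slot
--     fpath = ''
--     for line in lines:
--         if 'Output' in line:
--             fpath = line.split(':')[1].strip()
--
--     # pass 2: drop everything before the first real 'Extensions:' marker,
--     # then keep the non-error, non-'Output' lines (the marker line included)
--     def is_marker(l):
--         return 'Extensions:' in l and 'Output' not in l
--
--     def dropped(l):
--         if 'Output' in l:
--             return True
--         if 'Extensions:' in l:
--             return False
--         return ('Error Log:' in l or '] 400 - ' in l or '] 401 - ' in l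
--                 or '] 402 - ' in l or '] 403 - ' in l or '] 404 - ' in l)
--
--     while lines and not is_marker(lines[0]):
--         lines = lines[1:]
--     return ''.join(l + '\n' for l in lines if not dropped(l)), fpath
-- ===== Notes on version B (the rewrite author's own statement) =====
-- stated objective: alternative
-- what changed: Replaces A's single stateful loop (flag x, interleaved branches) by two independent passes: a fold taking the last 'Output' line for fpath, and a drop-prefix-then-filter-then-join pipeline for ret, with the redundant 'Output File:' test removed (it is subsumed by the 'Output' check).
import Mathlib
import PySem

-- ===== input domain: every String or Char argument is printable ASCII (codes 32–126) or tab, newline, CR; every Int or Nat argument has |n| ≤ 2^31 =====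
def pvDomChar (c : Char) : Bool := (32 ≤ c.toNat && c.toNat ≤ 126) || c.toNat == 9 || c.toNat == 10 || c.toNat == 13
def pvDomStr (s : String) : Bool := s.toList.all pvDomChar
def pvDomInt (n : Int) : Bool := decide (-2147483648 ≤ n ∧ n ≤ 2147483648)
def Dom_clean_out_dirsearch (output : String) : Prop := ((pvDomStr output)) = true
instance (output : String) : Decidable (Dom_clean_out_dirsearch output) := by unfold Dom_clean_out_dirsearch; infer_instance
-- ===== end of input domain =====

-- B replaces A's single stateful loop by two independent passes (last-'Output' fold for
-- fpath; drop-prefix / filter / join for ret) — an alternative decomposition, same cost.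

-- needle literals shared by both ports
def pvOut : List Char := "Output".toList
def pvExt : List Char := "Extensions:".toList
def pvErr : List Char := "Error Log:".toList
def pvOF : List Char := "Output File:".toList
def pv400 : List Char := "] 400 - ".toList
def pv401 : List Char := "] 401 - ".toList
def pv402 : List Char := "] 402 - ".toList
def pv403 : List Char := "] 403 - ".toList
def pv404 : List Char := "] 404 - ".toList
def pvColon : List Char := ":".toList
def pvNl : List Char := "\n".toList

-- ===== PORT A =====
def pvStepA (st : Option (List Char × Bool × List Char)) (line : List Char) :
    Option (List Char × Bool × List Char) :=
  match st with
  | none => none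
  | some (ret, x, fpath) =>
    if PySem.Chars.isIn pvOut line then
      -- line.split(":")[1].strip(); [1]? = none is Python's IndexError (excluded by Pre_)
      ((PySem.Chars.splitOn line pvColon)[1]?).map
        (fun p => (ret, x, PySem.Chars.strip p))
    else if PySem.Chars.isIn pvExt line then
      some (ret ++ line ++ ['\n'], true, fpath)
    else if PySem.Chars.isIn pvErr line || PySem.Chars.isIn pvOF line
         || PySem.Chars.isIn pv400 line || PySem.Chars.isIn pv401 line
         || PySem.Chars.isIn pv402 line || PySem.Chars.isIn pv403 line
         || PySem.Chars.isIn pv404 line || x == false then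
      some (ret, x, fpath)
    else
      some (ret ++ line ++ ['\n'], x, fpath)

def clean_out_dirsearch (output : String) : String × String :=
  match (PySem.Chars.splitOn output.toList pvNl).foldl pvStepA (some ([], false, [])) with
  | some (ret, _, fpath) => (String.ofList ret, String.ofList fpath)
  | none => ("", "")   -- unreachable inside Pre_: Python A raises IndexError there

-- ===== PORT B =====
def pvStepFp (acc : Option (List Char)) (line : List Char) : Option (List Char) :=
  acc.bind fun fp =>
    if PySem.Chars.isIn pvOut line then
      ((PySem.Chars.splitOn line pvColon)[1]?).map PySem.Chars.strip
    else some fp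

def pvIsMarker (l : List Char) : Bool :=
  PySem.Chars.isIn pvExt l && !PySem.Chars.isIn pvOut l

def pvDropped (l : List Char) : Bool :=
  if PySem.Chars.isIn pvOut l then true
  else if PySem.Chars.isIn pvExt l then false
  else PySem.Chars.isIn pvErr l
    || PySem.Chars.isIn pv400 l || PySem.Chars.isIn pv401 l
    || PySem.Chars.isIn pv402 l || PySem.Chars.isIn pv403 l
    || PySem.Chars.isIn pv404 l

def pvJoinNl (ls : List (List Char)) : List Char :=
  ls.foldr (fun l acc => l ++ '\n' :: acc) []

def clean_out_dirsearch_alt (output : String) : String × String :=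
  let lines := PySem.Chars.splitOn output.toList pvNl
  let fpath? := lines.foldl pvStepFp (some [])
  let rest := lines.dropWhile (fun l => !pvIsMarker l)   -- the 'while … lines = lines[1:]' loop
  let ret := pvJoinNl (rest.filter (fun l => !pvDropped l))
  match fpath? with
  | some fp => (String.ofList ret, String.ofList fp)
  | none => ("", "")   -- unreachable inside Pre_: Python B raises IndexError there

-- ===== PRECONDITION & SPEC =====
-- Pre_ excludes exactly the inputs where Python A raises IndexError: a line that
-- contains 'Output' but no ':' makes line.split(":")[1] fail (B raises there too).
def Pre_clean_out_dirsearch (output : String) : Prop :=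
  ∀ l ∈ PySem.Chars.splitOn output.toList pvNl,
    PySem.Chars.isIn pvOut l = true → PySem.Chars.isIn pvColon l = true

instance (output : String) : Decidable (Pre_clean_out_dirsearch output) := by
  unfold Pre_clean_out_dirsearch; infer_instance

def pvWitness_clean_out_dirsearch : String :=
  "Extensions: php\nOutput File: /tmp/rep\n[12:00] 404 - 3B - /x\n[12:01] 200 - 5B - /ok"

def Spec_clean_out_dirsearch (output : String) (out : String × String) : Prop := out = clean_out_dirsearch_alt output
instance (output : String) (out : String × String) : Decidable (Spec_clean_out_dirsearch output out) := by unfold Spec_clean_out_dirsearch; infer_instance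

-- ===== CLAIM (what is proved, stated in full; the proofs are below) =====
def Claim_equal_clean_out_dirsearch : Prop := ∀ (output : String), Dom_clean_out_dirsearch output → Pre_clean_out_dirsearch output → Spec_clean_out_dirsearch output (clean_out_dirsearch output)

-- ===== LEMMAS AND PROOFS =====

theorem pvFoldA_none (lines : List (List Char)) :
    lines.foldl pvStepA none = none := by
  induction lines with
  | nil => rfl
  | cons l ls ih => simpa [pvStepA] using ih

theorem pvFoldFp_none (lines : List (List Char)) :
    lines.foldl pvStepFp none = none := by
  induction lines with
  | nil => rfl
  | cons l ls ih => simpa [pvStepFp] using ih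

theorem pvOF_imp_O (l : List Char)
    (h : PySem.Chars.isIn pvOF l = true) :
    PySem.Chars.isIn pvOut l = true := by
  rw [PySem.Chars.isIn_iff_infix] at h ⊢
  exact List.IsInfix.trans (by decide) h

-- the A-loop from state x = true is B's fpath fold together with B's keep-filter
theorem pvFoldA_true (lines : List (List Char)) (ret fpath : List Char) :
    lines.foldl pvStepA (some (ret, true, fpath)) =
      (lines.foldl pvStepFp (some fpath)).map
        (fun fp => (ret ++ pvJoinNl (lines.filter (fun l => !pvDropped l)), true, fp)) := by
  induction lines generalizing ret fpath with
  | nil => simp [pvJoinNl]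
  | cons line ls ih =>
    simp only [List.foldl_cons]
    cases hO : PySem.Chars.isIn pvOut line with
    | true =>
      have hd : pvDropped line = true := by simp [pvDropped, hO]
      cases h1 : (PySem.Chars.splitOn line pvColon)[1]? with
      | none =>
        simp only [pvStepA, pvStepFp, hO, if_true, h1, Option.map_none, Option.bind_some]
        simp [pvFoldA_none, pvFoldFp_none]
      | some p =>
        simp only [pvStepA, pvStepFp, hO, if_true, h1, Option.map_some, Option.bind_some]
        rw [ih ret (PySem.Chars.strip p)]
        simp [hd]
    | false =>
      cases hX : PySem.Chars.isIn pvExt line with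
      | true =>
        have hd : pvDropped line = false := by simp [pvDropped, hO, hX]
        simp only [pvStepA, pvStepFp, hO, hX, Bool.false_eq_true, if_false, if_true,
          Option.bind_some]
        rw [ih (ret ++ line ++ ['\n']) fpath]
        simp [hd, pvJoinNl, List.append_assoc]
      | false =>
        have hOF : PySem.Chars.isIn pvOF line = false := by
          cases h : PySem.Chars.isIn pvOF line
          · rfl
          · rw [pvOF_imp_O line h] at hO; exact absurd hO (by simp)
        by_cases hE : (PySem.Chars.isIn pvErr line
            || PySem.Chars.isIn pv400 line || PySem.Chars.isIn pv401 line
            || PySem.Chars.isIn pv402 line || PySem.Chars.isIn pv403 line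
            || PySem.Chars.isIn pv404 line) = true
        ·
          have hd : pvDropped line = true := by
            simp only [pvDropped, hO, hX, Bool.false_eq_true, if_false]; exact hE
          have hstep : pvStepA (some (ret, true, fpath)) line = some (ret, true, fpath) := by
            simp only [pvStepA, hO, hX, hOF, Bool.false_eq_true, if_false]
            simp only [Bool.or_eq_true] at hE
            rcases hE with ((((h|h)|h)|h)|h)|h <;> simp [h]
          rw [hstep]
          simp only [pvStepFp, hO, Bool.false_eq_true, if_false, Option.bind_some]
          rw [ih ret fpath]
          simp [hd]
        · rw [Bool.not_eq_true] at hE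
          have hd : pvDropped line = false := by
            simp only [pvDropped, hO, hX, Bool.false_eq_true, if_false]; exact hE
          have hstep : pvStepA (some (ret, true, fpath)) line
              = some (ret ++ line ++ ['\n'], true, fpath) := by
            simp [pvStepA, hO, hX, hOF, hE]
          rw [hstep]
          simp only [pvStepFp, hO, Bool.false_eq_true, if_false, Option.bind_some]
          rw [ih (ret ++ line ++ ['\n']) fpath]
          simp [hd, pvJoinNl, List.append_assoc]

-- the A-loop from its initial state x = false is B's two passes
theorem pvFoldA_false (lines : List (List Char)) (ret fpath : List Char) :
    lines.foldl pvStepA (some (ret, false, fpath)) =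
      (lines.foldl pvStepFp (some fpath)).map
        (fun fp => (ret ++ pvJoinNl ((lines.dropWhile (fun l => !pvIsMarker l)).filter
            (fun l => !pvDropped l)), lines.any pvIsMarker, fp)) := by
  induction lines generalizing ret fpath with
  | nil => simp [pvJoinNl]
  | cons line ls ih =>
    simp only [List.foldl_cons, List.any_cons]
    cases hM : pvIsMarker line with
    | true =>
      have hX : PySem.Chars.isIn pvExt line = true := by
        have := hM; simp only [pvIsMarker, Bool.and_eq_true] at this; exact this.1
      have hO : PySem.Chars.isIn pvOut line = false := by
        have := hM; simp only [pvIsMarker, Bool.and_eq_true, Bool.not_eq_true'] at this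
        exact this.2
      have hd : pvDropped line = false := by simp [pvDropped, hO, hX]
      have hstep : pvStepA (some (ret, false, fpath)) line
          = some (ret ++ line ++ ['\n'], true, fpath) := by
        simp [pvStepA, hO, hX]
      rw [hstep]
      simp only [pvStepFp, hO, Bool.false_eq_true, if_false, Option.bind_some]
      rw [pvFoldA_true ls (ret ++ line ++ ['\n']) fpath]
      simp [hM, hd, pvJoinNl, List.append_assoc]
    | false =>
      cases hO : PySem.Chars.isIn pvOut line with
      | true =>
        cases h1 : (PySem.Chars.splitOn line pvColon)[1]? with
        | none =>
          simp only [pvStepA, pvStepFp, hO, if_true, h1, Option.map_none, Option.bind_some]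
          simp [pvFoldA_none, pvFoldFp_none]
        | some p =>
          simp only [pvStepA, pvStepFp, hO, if_true, h1, Option.map_some, Option.bind_some]
          rw [ih ret (PySem.Chars.strip p)]
          simp [hM]
      | false =>
        have hX : PySem.Chars.isIn pvExt line = false := by
          cases hx : PySem.Chars.isIn pvExt line
          · rfl
          · have : pvIsMarker line = true := by simp [pvIsMarker, hx, hO]
            rw [this] at hM; exact absurd hM (by simp)
        have hstep : pvStepA (some (ret, false, fpath)) line = some (ret, false, fpath) := by
          simp [pvStepA, hO, hX]
        rw [hstep]
        simp only [pvStepFp, hO, Bool.false_eq_true, if_false, Option.bind_some]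
        rw [ih ret fpath]
        simp [hM]

-- ===== VERDICT (by name: the statement is the Claim_ definition above) =====
theorem clean_out_dirsearch_spec : Claim_equal_clean_out_dirsearch := by
  intro output _ _
  show clean_out_dirsearch output = clean_out_dirsearch_alt output
  simp only [clean_out_dirsearch, clean_out_dirsearch_alt]
  rw [pvFoldA_false]
  cases h : (PySem.Chars.splitOn output.toList pvNl).foldl pvStepFp (some []) with
  | none => simp
  | some fp => simp
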